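-- pv_equiv track=rewrite | github.com/wyz-git/tita_control | media_transmission_deb/usr/media-transmission/mqtt_window_control.py | _crsf_crc8
-- ===== SOURCE A (Python) =====
-- def _crsf_crc8(data):
--     """计算CRC8"""
--     crsf_crc8tab = [
--         0x00, 0xD5, 0x7F, 0xAA, 0xFE, 0x2B, 0x81, 0x54, 0x29, 0xFC, 0x56,
--         0x83, 0xD7, 0x02, 0xA8, 0x7D, 0x52, 0x87, 0x2D, 0xF8, 0xAC, 0x79,
--         0xD3, 0x06, 0x7B, 0xAE, 0x04, 0xD1, 0x85, 0x50, 0xFA, 0x2F, 0xA4,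
--         0x71, 0xDB, 0x0E, 0x5A, 0x8F, 0x25, 0xF0, 0x8D, 0x58, 0xF2, 0x27,
--         0x73, 0xA6, 0x0C, 0xD9, 0xF6, 0x23, 0x89, 0x5C, 0x08, 0xDD, 0x77,
--         0xA2, 0xDF, 0x0A, 0xA0, 0x75, 0x21, 0xF4, 0x5E, 0x8B, 0x9D, 0x48,
--         0xE2, 0x37, 0x63, 0xB6, 0x1C, 0xC9, 0xB4, 0x61, 0xCB, 0x1E, 0x4A,
--         0x9F, 0x35, 0xE0, 0xCF, 0x1A, 0xB0, 0x65, 0x31, 0xE4, 0x4E, 0x9B,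
--         0xE6, 0x33, 0x99, 0x4C, 0x18, 0xCD, 0x67, 0xB2, 0x39, 0xEC, 0x46,
--         0x93, 0xC7, 0x12, 0xB8, 0x6D, 0x10, 0xC5, 0x6F, 0xBA, 0xEE, 0x3B,
--         0x91, 0x44, 0x6B, 0xBE, 0x14, 0xC1, 0x95, 0x40, 0xEA, 0x3F, 0x42,
--         0x97, 0x3D, 0xE8, 0xBC, 0x69, 0xC3, 0x16, 0xEF, 0x3A, 0x90, 0x45,
--         0x11, 0xC4, 0x6E, 0xBB, 0xC6, 0x13, 0xB9, 0x6C, 0x38, 0xED, 0x47,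
--         0x92, 0xBD, 0x68, 0xC2, 0x17, 0x43, 0x96, 0x3C, 0xE9, 0x94, 0x41,
--         0xEB, 0x3E, 0x6A, 0xBF, 0x15, 0xC0, 0x4B, 0x9E, 0x34, 0xE1, 0xB5,
--         0x60, 0xCA, 0x1F, 0x62, 0xB7, 0x1D, 0xC8, 0x9C, 0x49, 0xE3, 0x36,
--         0x19, 0xCC, 0x66, 0xB3, 0xE7, 0x32, 0x98, 0x4D, 0x30, 0xE5, 0x4F,
--         0x9A, 0xCE, 0x1B, 0xB1, 0x64, 0x72, 0xA7, 0x0D, 0xD8, 0x8C, 0x59,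
--         0xF3, 0x26, 0x5B, 0x8E, 0x24, 0xF1, 0xA5, 0x70, 0xDA, 0x0F, 0x20,
--         0xF5, 0x5F, 0x8A, 0xDE, 0x0B, 0xA1, 0x74, 0x09, 0xDC, 0x76, 0xA3,
--         0xF7, 0x22, 0x88, 0x5D, 0xD6, 0x03, 0xA9, 0x7C, 0x28, 0xFD, 0x57,
--         0x82, 0xFF, 0x2A, 0x80, 0x55, 0x01, 0xD4, 0x7E, 0xAB, 0x84, 0x51,
--         0xFB, 0x2E, 0x7A, 0xAF, 0x05, 0xD0, 0xAD, 0x78, 0xD2, 0x07, 0x53,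
--         0x86, 0x2C, 0xF9
--     ]
--     crc = 0
--     for byte in data:
--         crc = crsf_crc8tab[crc ^ byte]
--     return crc
-- ===== SOURCE B (Python) =====
-- def _crsf_crc8(data):
--     """计算CRC8 (CRSF polynomial 0xD5, MSB-first, init 0, no final XOR) — bitwise, no table."""
--     crc = 0
--     for byte in data:
--         crc ^= byte
--         for _ in range(8):
--             if crc & 0x80:
--                 crc = ((crc << 1) ^ 0xD5) & 0xFF
--             else:
--                 crc = (crc << 1) & 0xFF
--     return crc
-- ===== Notes on version B (the rewrite author's own statement) =====
-- stated objective: alternative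
-- what changed: Replaces the 256-entry lookup table with a bitwise MSB-first CRC8 over polynomial 0xD5 (init 0, no final XOR): each byte is XORed into the accumulator and shifted 8 times, so no table is stored.
import Mathlib
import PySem

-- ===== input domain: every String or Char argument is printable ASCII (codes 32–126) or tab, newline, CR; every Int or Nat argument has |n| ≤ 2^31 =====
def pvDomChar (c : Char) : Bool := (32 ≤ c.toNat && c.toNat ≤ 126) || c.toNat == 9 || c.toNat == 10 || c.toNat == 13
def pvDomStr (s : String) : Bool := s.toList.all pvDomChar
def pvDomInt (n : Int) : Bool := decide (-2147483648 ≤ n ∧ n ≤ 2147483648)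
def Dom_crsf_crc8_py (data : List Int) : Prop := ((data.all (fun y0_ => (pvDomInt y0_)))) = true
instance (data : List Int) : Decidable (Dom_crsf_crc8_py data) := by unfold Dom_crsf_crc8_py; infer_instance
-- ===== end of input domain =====

-- B replaces A's 256-entry lookup table with the bitwise MSB-first CRC8 over polynomial 0xD5
-- (init 0, no final XOR); objective: alternative algorithm, no table stored.

-- ===== PORT A =====
-- A's local table `crsf_crc8tab` (a literal list in A's body, hoisted as a helper)
def crsfCrc8Tab : List Int := [0x00, 0xD5, 0x7F, 0xAA, 0xFE, 0x2B, 0x81, 0x54, 0x29, 0xFC, 0x56,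
  0x83, 0xD7, 0x02, 0xA8, 0x7D, 0x52, 0x87, 0x2D, 0xF8, 0xAC, 0x79,
  0xD3, 0x06, 0x7B, 0xAE, 0x04, 0xD1, 0x85, 0x50, 0xFA, 0x2F, 0xA4,
  0x71, 0xDB, 0x0E, 0x5A, 0x8F, 0x25, 0xF0, 0x8D, 0x58, 0xF2, 0x27,
  0x73, 0xA6, 0x0C, 0xD9, 0xF6, 0x23, 0x89, 0x5C, 0x08, 0xDD, 0x77,
  0xA2, 0xDF, 0x0A, 0xA0, 0x75, 0x21, 0xF4, 0x5E, 0x8B, 0x9D, 0x48,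
  0xE2, 0x37, 0x63, 0xB6, 0x1C, 0xC9, 0xB4, 0x61, 0xCB, 0x1E, 0x4A,
  0x9F, 0x35, 0xE0, 0xCF, 0x1A, 0xB0, 0x65, 0x31, 0xE4, 0x4E, 0x9B,
  0xE6, 0x33, 0x99, 0x4C, 0x18, 0xCD, 0x67, 0xB2, 0x39, 0xEC, 0x46,
  0x93, 0xC7, 0x12, 0xB8, 0x6D, 0x10, 0xC5, 0x6F, 0xBA, 0xEE, 0x3B,
  0x91, 0x44, 0x6B, 0xBE, 0x14, 0xC1, 0x95, 0x40, 0xEA, 0x3F, 0x42,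
  0x97, 0x3D, 0xE8, 0xBC, 0x69, 0xC3, 0x16, 0xEF, 0x3A, 0x90, 0x45,
  0x11, 0xC4, 0x6E, 0xBB, 0xC6, 0x13, 0xB9, 0x6C, 0x38, 0xED, 0x47,
  0x92, 0xBD, 0x68, 0xC2, 0x17, 0x43, 0x96, 0x3C, 0xE9, 0x94, 0x41,
  0xEB, 0x3E, 0x6A, 0xBF, 0x15, 0xC0, 0x4B, 0x9E, 0x34, 0xE1, 0xB5,
  0x60, 0xCA, 0x1F, 0x62, 0xB7, 0x1D, 0xC8, 0x9C, 0x49, 0xE3, 0x36,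
  0x19, 0xCC, 0x66, 0xB3, 0xE7, 0x32, 0x98, 0x4D, 0x30, 0xE5, 0x4F,
  0x9A, 0xCE, 0x1B, 0xB1, 0x64, 0x72, 0xA7, 0x0D, 0xD8, 0x8C, 0x59,
  0xF3, 0x26, 0x5B, 0x8E, 0x24, 0xF1, 0xA5, 0x70, 0xDA, 0x0F, 0x20,
  0xF5, 0x5F, 0x8A, 0xDE, 0x0B, 0xA1, 0x74, 0x09, 0xDC, 0x76, 0xA3,
  0xF7, 0x22, 0x88, 0x5D, 0xD6, 0x03, 0xA9, 0x7C, 0x28, 0xFD, 0x57,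
  0x82, 0xFF, 0x2A, 0x80, 0x55, 0x01, 0xD4, 0x7E, 0xAB, 0x84, 0x51,
  0xFB, 0x2E, 0x7A, 0xAF, 0x05, 0xD0, 0xAD, 0x78, 0xD2, 0x07, 0x53,
  0x86, 0x2C, 0xF9]

-- crc = crsf_crc8tab[crc ^ byte]; the IndexError case (pyGet? = none) is excluded by Pre_, .getD 0 is never taken there
def crsf_crc8_py (data : List Int) : Int :=
  data.foldl (fun crc byte => (PySem.List.pyGet? crsfCrc8Tab (PySem.Int.bxor crc byte)).getD 0) 0

-- ===== PORT B =====
-- one round of `if crc & 0x80: crc = ((crc << 1) ^ 0xD5) & 0xFF else: crc = (crc << 1) & 0xFF`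
def crc8Round (c : Int) : Int :=
  if PySem.Int.band c 0x80 ≠ 0 then PySem.Int.band (PySem.Int.bxor (c <<< (1 : Int)) 0xD5) 0xFF
  else PySem.Int.band (c <<< (1 : Int)) 0xFF

def crsf_crc8_py_alt (data : List Int) : Int :=
  data.foldl (fun crc byte => (List.range 8).foldl (fun c _ => crc8Round c) (PySem.Int.bxor crc byte)) 0

-- ===== PRECONDITION & SPEC =====
-- Pre_ is exactly where A returns normally: on any element outside this band the table
-- index crc ^ byte leaves the 256-entry table's valid index range and A raises IndexError.
def Pre_crsf_crc8_py (data : List Int) : Prop := ∀ b ∈ data, -256 ≤ b ∧ b ≤ 255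
instance (data : List Int) : Decidable (Pre_crsf_crc8_py data) := by unfold Pre_crsf_crc8_py; infer_instance
def pvWitness_crsf_crc8_py : List Int := [1, 2, 3]

def Spec_crsf_crc8_py (data : List Int) (out : Int) : Prop := out = crsf_crc8_py_alt data
instance (data : List Int) (out : Int) : Decidable (Spec_crsf_crc8_py data out) := by unfold Spec_crsf_crc8_py; infer_instance

-- ===== CLAIM (what is proved, stated in full; the proofs are below) =====
def Claim_equal_crsf_crc8_py : Prop := ∀ (data : List Int), Dom_crsf_crc8_py data → Pre_crsf_crc8_py data → Spec_crsf_crc8_py data (crsf_crc8_py data)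

-- ===== LEMMAS AND PROOFS =====

-- the per-byte step of each port, as a function of the table index i = crc ^ byte
def stepA (i : Int) : Int := (PySem.List.pyGet? crsfCrc8Tab i).getD 0
def stepB (i : Int) : Int := (List.range 8).foldl (fun c _ => crc8Round c) i

-- on nonnegative indices 0..255 the table entry equals eight bitwise rounds, and is a byte
set_option maxRecDepth 10000 in
lemma step_eq_pos : ∀ k : Fin 256, stepA (k : Int) = stepB (k : Int) ∧
    0 ≤ stepA (k : Int) ∧ stepA (k : Int) < 256 := by decide

-- on negative indices -256..-1 Python's wraparound lookup still equals the bitwise rounds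
set_option maxRecDepth 10000 in
lemma step_eq_neg : ∀ k : Fin 256, stepA ((k : Int) - 256) = stepB ((k : Int) - 256) ∧
    0 ≤ stepA ((k : Int) - 256) ∧ stepA ((k : Int) - 256) < 256 := by decide

lemma bxor_negSucc (m n : Nat) :
    PySem.Int.bxor (Int.ofNat m) (Int.negSucc n) = -((m ^^^ n : Nat) : Int) - 1 := by
  simp [PySem.Int.bxor]

lemma step_eq (crc byte : Int) (h0 : 0 ≤ crc) (h1 : crc < 256)
    (hb0 : -256 ≤ byte) (hb1 : byte ≤ 255) :
    stepA (PySem.Int.bxor crc byte) = stepB (PySem.Int.bxor crc byte) ∧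
    0 ≤ stepA (PySem.Int.bxor crc byte) ∧ stepA (PySem.Int.bxor crc byte) < 256 := by
  obtain ⟨cm, rfl⟩ := Int.eq_ofNat_of_zero_le h0
  have hcm : cm < 256 := by exact_mod_cast h1
  cases byte with
  | ofNat bm =>
    simp only [Int.ofNat_eq_natCast] at hb1 ⊢
    have hbm : bm < 256 := by exact_mod_cast (by omega : (bm : Int) < 256)
    have hx : cm ^^^ bm < 256 := Nat.xor_lt_two_pow (n := 8) hcm hbm
    have he : PySem.Int.bxor (cm : Int) (bm : Int) = ((⟨cm ^^^ bm, hx⟩ : Fin 256) : Int) := by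
      simp [PySem.Int.bxor_natCast cm bm]
    rw [he]; exact step_eq_pos ⟨cm ^^^ bm, hx⟩
  | negSucc n =>
    have hn : n < 256 := by
      have : -256 ≤ Int.negSucc n := hb0
      omega
    have hx : cm ^^^ n < 256 := Nat.xor_lt_two_pow (n := 8) hcm hn
    have he : PySem.Int.bxor (cm : Int) (Int.negSucc n)
        = ((⟨255 - (cm ^^^ n), by omega⟩ : Fin 256) : Int) - 256 := by
      rw [show ((cm : Int)) = Int.ofNat cm from rfl, bxor_negSucc]
      have : ((⟨255 - (cm ^^^ n), by omega⟩ : Fin 256) : Int) = 255 - ((cm ^^^ n : Nat) : Int) := by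
        simp; omega
      rw [this]; omega
    rw [he]; exact step_eq_neg ⟨255 - (cm ^^^ n), by omega⟩

lemma fold_eq (data : List Int) (hpre : ∀ b ∈ data, -256 ≤ b ∧ b ≤ 255) :
    ∀ crc : Int, 0 ≤ crc → crc < 256 →
      data.foldl (fun crc byte => (PySem.List.pyGet? crsfCrc8Tab (PySem.Int.bxor crc byte)).getD 0) crc
      = data.foldl (fun crc byte => (List.range 8).foldl (fun c _ => crc8Round c) (PySem.Int.bxor crc byte)) crc := by
  induction data with
  | nil => intro crc _ _; rfl
  | cons b rest ih =>
    intro crc h0 h1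
    have hb := hpre b (List.mem_cons_self ..)
    obtain ⟨heq, hlo, hhi⟩ := step_eq crc b h0 h1 hb.1 hb.2
    simp only [List.foldl_cons]
    rw [show ((List.range 8).foldl (fun c _ => crc8Round c) (PySem.Int.bxor crc b))
          = stepB (PySem.Int.bxor crc b) from rfl, ← heq]
    exact ih (fun x hx => hpre x (List.mem_cons_of_mem _ hx)) _ hlo hhi

-- ===== VERDICT (by name: the statement is the Claim_ definition above) =====
theorem crsf_crc8_py_spec : Claim_equal_crsf_crc8_py := by
  intro data _ hpre
  unfold Spec_crsf_crc8_py crsf_crc8_py crsf_crc8_py_alt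
  exact fold_eq data hpre 0 le_rfl (by norm_num)
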